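-- pv_equiv track=rewrite | github.com/alphacrack/iac-scanner | src/iac_scanner/rules/checkov.py | _framework_hint
-- ===== SOURCE A (Python) =====
-- def _framework_hint(check_id: str) -> str | None:
--     """Infer a framework tag from Checkov's check_id prefix."""
--     prefix_to_framework = {
--         "CKV_AWS_": "AWS",
--         "CKV_AZURE_": "Azure",
--         "CKV_GCP_": "GCP",
--         "CKV_K8S_": "Kubernetes",
--         "CKV_DOCKER_": "Docker",
--         "CKV2_AWS_": "AWS",
--         "CKV2_AZURE_": "Azure",
--         "CKV2_GCP_": "GCP",
--     }
--     for prefix, fw in prefix_to_framework.items():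
--         if check_id.startswith(prefix):
--             return fw
--     return None
-- ===== SOURCE B (Python) =====
-- _PROVIDER_TO_FRAMEWORK = {
--     "AWS": "AWS",
--     "AZURE": "Azure",
--     "GCP": "GCP",
--     "K8S": "Kubernetes",
--     "DOCKER": "Docker",
-- }
--
--
-- def _framework_hint(check_id: str) -> str | None:
--     """Infer a framework tag from Checkov's check_id prefix."""
--     parts = check_id.split("_")
--     if len(parts) < 3:
--         return None
--     version, provider = parts[0], parts[1]
--     if version == "CKV":
--         return _PROVIDER_TO_FRAMEWORK.get(provider)
--     if version == "CKV2" and provider in ("AWS", "AZURE", "GCP"):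
--         return _PROVIDER_TO_FRAMEWORK[provider]
--     return None
-- ===== Notes on version B (the rewrite author's own statement) =====
-- stated objective: idiomatic
-- what changed: B parses the check_id once by splitting it on underscores and classifies the (version, provider) token pair via one table lookup plus a CKV2 provider whitelist, instead of A's sequential startswith scan over eight literal prefixes.
import Mathlib
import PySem

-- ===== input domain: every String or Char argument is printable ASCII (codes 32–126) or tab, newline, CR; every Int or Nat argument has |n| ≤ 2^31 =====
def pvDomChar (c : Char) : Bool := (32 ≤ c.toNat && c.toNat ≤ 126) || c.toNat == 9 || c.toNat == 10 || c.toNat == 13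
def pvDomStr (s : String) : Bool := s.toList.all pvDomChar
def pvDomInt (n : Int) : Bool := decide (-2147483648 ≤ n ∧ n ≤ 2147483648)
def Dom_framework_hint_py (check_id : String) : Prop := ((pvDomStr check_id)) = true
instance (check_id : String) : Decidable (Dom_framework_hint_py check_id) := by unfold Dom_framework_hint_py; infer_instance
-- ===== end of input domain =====

-- B parses the id once (split on '_') and classifies the (version, provider) pair by table
-- lookup instead of A's sequential scan over eight literal prefixes; objective: idiomatic.

-- ===== PORT A =====
-- A's literal prefix→framework dict, in insertion order.
def fhPrefixTable : List (String × String) :=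
  [("CKV_AWS_", "AWS"), ("CKV_AZURE_", "Azure"), ("CKV_GCP_", "GCP"),
   ("CKV_K8S_", "Kubernetes"), ("CKV_DOCKER_", "Docker"),
   ("CKV2_AWS_", "AWS"), ("CKV2_AZURE_", "Azure"), ("CKV2_GCP_", "GCP")]

-- A's for-loop over the dict items with early return.
def fhLoop (check_id : String) : List (String × String) → Option String
  | [] => none
  | (p, fw) :: rest =>
      if PySem.Str.startswith check_id p then some fw else fhLoop check_id rest

def framework_hint_py (check_id : String) : Option String :=
  fhLoop check_id fhPrefixTable

-- ===== PORT B =====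
-- B's provider→framework table.
def fhProviderTable : PySem.Dict String String :=
  PySem.Dict.ofList
    [("AWS", "AWS"), ("AZURE", "Azure"), ("GCP", "GCP"),
     ("K8S", "Kubernetes"), ("DOCKER", "Docker")]

def framework_hint_py_alt (check_id : String) : Option String :=
  match PySem.Str.split? check_id "_" with
  | none => none  -- unreachable: the separator "_" is non-empty
  | some parts =>
    match parts with
    | version :: provider :: _ :: _ =>  -- len(parts) < 3 → None, else version, provider = parts[0], parts[1]
        if version = "CKV" then PySem.Dict.get? fhProviderTable provider
        else if version = "CKV2" ∧ (provider = "AWS" ∨ provider = "AZURE" ∨ provider = "GCP") then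
          PySem.Dict.get? fhProviderTable provider
        else none
    | _ => none

-- ===== PRECONDITION & SPEC =====
def Spec_framework_hint_py (check_id : String) (out : Option String) : Prop := out = framework_hint_py_alt check_id
instance (check_id : String) (out : Option String) : Decidable (Spec_framework_hint_py check_id out) := by unfold Spec_framework_hint_py; infer_instance

-- ===== CLAIM (what is proved, stated in full; the proofs are below) =====
def Claim_equal_framework_hint_py : Prop := ∀ (check_id : String), Dom_framework_hint_py check_id → Spec_framework_hint_py check_id (framework_hint_py check_id)

-- ===== LEMMAS AND PROOFS =====

-- A clean structural model of Python's split("_") on char lists.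
def mySplit : List Char → List (List Char)
  | [] => [[]]
  | c :: r => if c = '_' then [] :: mySplit r else (mySplit r).modifyHead (c :: ·)

-- joining the pieces back with '_'
def joinU : List (List Char) → List Char
  | [] => []
  | [a] => a
  | a :: b :: t => a ++ '_' :: joinU (b :: t)

theorem mySplit_ne_nil (L : List Char) : mySplit L ≠ [] := by
  induction L with
  | nil => simp [mySplit]
  | cons c r ih =>
      simp only [mySplit]
      split
      · simp
      · cases h : mySplit r with
        | nil => exact absurd h ih
        | cons b t => simp [h]

theorem go_eq_mySplit (L : List Char) : ∀ (fuel : Nat) (cur : List Char) (acc : List (List Char)),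
    L.length ≤ fuel →
    PySem.Chars.splitOn.go ['_'] fuel L cur acc =
      acc.reverse ++ (mySplit L).modifyHead (cur.reverse ++ ·) := by
  induction L with
  | nil =>
      intro fuel cur acc _
      cases fuel <;> simp [PySem.Chars.splitOn.go, mySplit]
  | cons c r ih =>
      intro fuel cur acc hlen
      cases fuel with
      | zero => simp at hlen
      | succ f =>
          have hstep : PySem.Chars.splitOn.go ['_'] (f+1) (c :: r) cur acc =
              if ['_'].isPrefixOf (c :: r)
              then PySem.Chars.splitOn.go ['_'] f (List.drop 1 (c :: r)) [] (cur.reverse :: acc)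
              else PySem.Chars.splitOn.go ['_'] f r (c :: cur) acc := by
            simp [PySem.Chars.splitOn.go]
          rw [hstep]
          have hr : r.length ≤ f := by simpa using hlen
          by_cases hc : c = '_'
          · subst hc
            simp only [List.isPrefixOf, BEq.rfl, Bool.true_and, List.isPrefixOf_nil_left,
              if_true, List.drop_one, List.tail_cons]
            rw [ih f [] (cur.reverse :: acc) hr]
            cases h : mySplit r with
            | nil => exact absurd h (mySplit_ne_nil r)
            | cons b t => simp [mySplit, h]
          · have hpf : ['_'].isPrefixOf (c :: r) = false := by
              simp [List.isPrefixOf]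
              intro h; exact absurd h.symm hc
            rw [hpf]
            simp only [Bool.false_eq_true, if_false]
            rw [ih f (c :: cur) acc hr]
            cases h : mySplit r with
            | nil => exact absurd h (mySplit_ne_nil r)
            | cons b t => simp [mySplit, hc, h]

theorem splitOn_eq_mySplit (L : List Char) :
    PySem.Chars.splitOn L ['_'] = mySplit L := by
  unfold PySem.Chars.splitOn
  rw [go_eq_mySplit L (L.length + 1) [] [] (by omega)]
  cases h : mySplit L with
  | nil => exact absurd h (mySplit_ne_nil L)
  | cons b t => simp

theorem split?_eq (s : String) :
    PySem.Str.split? s "_" = some ((mySplit s.toList).map String.ofList) := by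
  unfold PySem.Str.split?
  have : PySem.Chars.split? s.toList "_".toList = some (mySplit s.toList) := by
    unfold PySem.Chars.split?
    have : "_".toList = ['_'] := by decide
    rw [this]
    simp [splitOn_eq_mySplit]
  rw [this]
  simp

theorem mySplit_no_us (L : List Char) : ∀ x ∈ mySplit L, '_' ∉ x := by
  induction L with
  | nil => simp [mySplit]
  | cons c r ih =>
      simp only [mySplit]
      split
      · intro x hx
        rcases List.mem_cons.mp hx with h | h
        · subst h; simp
        · exact ih x h
      · rename_i hc
        cases h : mySplit r with
        | nil => exact absurd h (mySplit_ne_nil r)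
        | cons b t =>
            intro x hx
            simp only [List.modifyHead] at hx
            rcases List.mem_cons.mp hx with h' | h'
            · subst h'
              intro hm
              rcases List.mem_cons.mp hm with h'' | h''
              · exact hc h''.symm
              · exact ih b (h ▸ List.mem_cons_self) h''
            · exact ih x (h ▸ List.mem_cons_of_mem _ h')

theorem joinU_mySplit (L : List Char) : joinU (mySplit L) = L := by
  induction L with
  | nil => simp [mySplit, joinU]
  | cons c r ih =>
      simp only [mySplit]
      cases h : mySplit r with
      | nil => exact absurd h (mySplit_ne_nil r)
      | cons b t =>
          rw [h] at ih
          by_cases hc : c = '_'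
          · subst hc
            simp only [if_true, joinU, List.nil_append]
            rw [ih]
          · simp only [hc, if_false, List.modifyHead]
            cases t with
            | nil => simp only [joinU] at ih ⊢; rw [ih]
            | cons u t' => simp only [joinU, List.cons_append] at ih ⊢; rw [ih]

-- the underscore-alignment lemma: prefix-free tokens force token equality
theorem prefix_us (a : List Char) : ∀ (b x y : List Char), '_' ∉ a → '_' ∉ b →
    (a ++ '_' :: x <+: b ++ '_' :: y) → a = b ∧ x <+: y := by
  induction a with
  | nil =>
      intro b x y _ hb h
      cases b with
      | nil => simpa using h
      | cons d b' =>
          exfalso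
          simp only [List.nil_append, List.cons_append, List.cons_prefix_cons] at h
          exact hb (by simp [← h.1])
  | cons c a' ih =>
      intro b x y ha hb h
      cases b with
      | nil =>
          exfalso
          simp only [List.cons_append, List.nil_append, List.cons_prefix_cons] at h
          exact ha (by simp [h.1])
      | cons d b' =>
          simp only [List.cons_append, List.cons_prefix_cons] at h
          have ha' : '_' ∉ a' := fun hm => ha (List.mem_cons_of_mem _ hm)
          have hb' : '_' ∉ b' := fun hm => hb (List.mem_cons_of_mem _ hm)
          obtain ⟨heq, hpre⟩ := ih b' x y ha' hb' h.2
          exact ⟨by rw [h.1, heq], hpre⟩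

-- startswith against a two-token prefix, when the string itself has ≥ 3 tokens
theorem sw_iff (s pre : String) (x y V P R : List Char)
    (hx : '_' ∉ x) (hy : '_' ∉ y) (hV : '_' ∉ V) (hP : '_' ∉ P)
    (hpre : pre.toList = x ++ '_' :: (y ++ ['_']))
    (hL : s.toList = V ++ '_' :: (P ++ '_' :: R)) :
    PySem.Str.startswith s pre = (decide (V = x) && decide (P = y)) := by
  rw [PySem.Str.startswith_eq]
  by_cases h : pre.toList <+: s.toList
  · have hsw := (PySem.Chars.startswith_iff s.toList pre.toList).mpr h
    rw [hsw]
    rw [hpre, hL] at h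
    obtain ⟨h1, h2⟩ := prefix_us x V (y ++ ['_']) (P ++ '_' :: R) hx hV h
    have h2' : y ++ '_' :: ([] : List Char) <+: P ++ '_' :: R := by simpa using h2
    obtain ⟨h3, _⟩ := prefix_us y P [] R hy hP h2'
    simp [← h1, ← h3]
  · have hb : PySem.Chars.startswith s.toList pre.toList = false := by
      rcases hby : PySem.Chars.startswith s.toList pre.toList with _ | _
      · rfl
      · exact absurd ((PySem.Chars.startswith_iff _ _).mp hby) h
    rw [hb]
    by_cases hVx : V = x
    · by_cases hPy : P = y
      · exfalso
        apply h
        rw [hpre, hL, hVx, hPy]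
        exact ⟨R, by simp⟩
      · simp [hPy]
    · simp [hVx]

-- startswith is false when the string has fewer than two '_'
theorem sw_false1 (s pre : String) (hus : '_' ∈ pre.toList) (hs : '_' ∉ s.toList) :
    PySem.Str.startswith s pre = false := by
  rw [PySem.Str.startswith_eq]
  rcases hby : PySem.Chars.startswith s.toList pre.toList with _ | _
  · rfl
  · exact absurd (((PySem.Chars.startswith_iff _ _).mp hby).sublist.mem hus) hs

theorem sw_false2 (s pre : String) (x y V P : List Char)
    (hx : '_' ∉ x) (hV : '_' ∉ V) (hP : '_' ∉ P)
    (hpre : pre.toList = x ++ '_' :: (y ++ ['_']))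
    (hL : s.toList = V ++ '_' :: P) :
    PySem.Str.startswith s pre = false := by
  rw [PySem.Str.startswith_eq]
  rcases hby : PySem.Chars.startswith s.toList pre.toList with _ | _
  · rfl
  · exfalso
    have h := (PySem.Chars.startswith_iff _ _).mp hby
    rw [hpre, hL] at h
    obtain ⟨_, h2⟩ := prefix_us x V (y ++ ['_']) P hx hV h
    exact hP (h2.sublist.mem (by simp))

-- ===== VERDICT (by name: the statement is the Claim_ definition above) =====
theorem framework_hint_py_spec : Claim_equal_framework_hint_py := by
  intro s _
  unfold Spec_framework_hint_py framework_hint_py framework_hint_py_alt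
  rw [split?_eq s]
  simp only []
  cases hms : mySplit s.toList with
  | nil => exact absurd hms (mySplit_ne_nil s.toList)
  | cons V rest =>
    have hnoV : '_' ∉ V := mySplit_no_us s.toList V (hms ▸ List.mem_cons_self)
    have hjoin := joinU_mySplit s.toList
    rw [hms] at hjoin
    cases rest with
    | nil =>
        -- one token: s has no '_' at all; no prefix matches, B returns none
        have hs : '_' ∉ s.toList := by
          simp only [joinU] at hjoin
          rw [← hjoin]; exact hnoV
        simp only [List.map]
        have h1 := sw_false1 s "CKV_AWS_" (by decide) hs
        have h2 := sw_false1 s "CKV_AZURE_" (by decide) hs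
        have h3 := sw_false1 s "CKV_GCP_" (by decide) hs
        have h4 := sw_false1 s "CKV_K8S_" (by decide) hs
        have h5 := sw_false1 s "CKV_DOCKER_" (by decide) hs
        have h6 := sw_false1 s "CKV2_AWS_" (by decide) hs
        have h7 := sw_false1 s "CKV2_AZURE_" (by decide) hs
        have h8 := sw_false1 s "CKV2_GCP_" (by decide) hs
        simp only [fhLoop, fhPrefixTable, h1, h2, h3, h4, h5, h6, h7, h8,
          Bool.false_eq_true, if_false, List.map]
    | cons P rest2 =>
      have hnoP : '_' ∉ P :=
        mySplit_no_us s.toList P (hms ▸ List.mem_cons_of_mem _ List.mem_cons_self)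
      cases rest2 with
      | nil =>
          -- two tokens: s = V ++ '_' :: P; no two-underscore prefix matches, B returns none
          have hL : s.toList = V ++ '_' :: P := by
            simp only [joinU] at hjoin; exact hjoin.symm
          have h1 := sw_false2 s "CKV_AWS_" "CKV".toList ("AWS".toList) V P (by decide) hnoV hnoP (by decide) hL
          have h2 := sw_false2 s "CKV_AZURE_" "CKV".toList ("AZURE".toList) V P (by decide) hnoV hnoP (by decide) hL
          have h3 := sw_false2 s "CKV_GCP_" "CKV".toList ("GCP".toList) V P (by decide) hnoV hnoP (by decide) hL
          have h4 := sw_false2 s "CKV_K8S_" "CKV".toList ("K8S".toList) V P (by decide) hnoV hnoP (by decide) hL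
          have h5 := sw_false2 s "CKV_DOCKER_" "CKV".toList ("DOCKER".toList) V P (by decide) hnoV hnoP (by decide) hL
          have h6 := sw_false2 s "CKV2_AWS_" "CKV2".toList ("AWS".toList) V P (by decide) hnoV hnoP (by decide) hL
          have h7 := sw_false2 s "CKV2_AZURE_" "CKV2".toList ("AZURE".toList) V P (by decide) hnoV hnoP (by decide) hL
          have h8 := sw_false2 s "CKV2_GCP_" "CKV2".toList ("GCP".toList) V P (by decide) hnoV hnoP (by decide) hL
          simp only [fhLoop, fhPrefixTable, h1, h2, h3, h4, h5, h6, h7, h8,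
            Bool.false_eq_true, if_false, List.map]
      | cons U rest3 =>
          -- three or more tokens
          have hL : s.toList = V ++ '_' :: (P ++ '_' :: joinU (U :: rest3)) := by
            simp only [joinU] at hjoin ⊢
            rw [← hjoin]
          have h1 := sw_iff s "CKV_AWS_" "CKV".toList "AWS".toList V P _ (by decide) (by decide) hnoV hnoP (by decide) hL
          have h2 := sw_iff s "CKV_AZURE_" "CKV".toList "AZURE".toList V P _ (by decide) (by decide) hnoV hnoP (by decide) hL
          have h3 := sw_iff s "CKV_GCP_" "CKV".toList "GCP".toList V P _ (by decide) (by decide) hnoV hnoP (by decide) hL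
          have h4 := sw_iff s "CKV_K8S_" "CKV".toList "K8S".toList V P _ (by decide) (by decide) hnoV hnoP (by decide) hL
          have h5 := sw_iff s "CKV_DOCKER_" "CKV".toList "DOCKER".toList V P _ (by decide) (by decide) hnoV hnoP (by decide) hL
          have h6 := sw_iff s "CKV2_AWS_" "CKV2".toList "AWS".toList V P _ (by decide) (by decide) hnoV hnoP (by decide) hL
          have h7 := sw_iff s "CKV2_AZURE_" "CKV2".toList "AZURE".toList V P _ (by decide) (by decide) hnoV hnoP (by decide) hL
          have h8 := sw_iff s "CKV2_GCP_" "CKV2".toList "GCP".toList V P _ (by decide) (by decide) hnoV hnoP (by decide) hL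
          simp only [fhLoop, fhPrefixTable, h1, h2, h3, h4, h5, h6, h7, h8, List.map,
            Bool.and_eq_true, decide_eq_true_eq]
          clear hms hjoin hL h1 h2 h3 h4 h5 h6 h7 h8 hnoV hnoP
          have g1 : PySem.Dict.get? fhProviderTable "AWS" = some "AWS" := by decide
          have g2 : PySem.Dict.get? fhProviderTable "AZURE" = some "Azure" := by decide
          have g3 : PySem.Dict.get? fhProviderTable "GCP" = some "GCP" := by decide
          have g4 : PySem.Dict.get? fhProviderTable "K8S" = some "Kubernetes" := by decide
          have g5 : PySem.Dict.get? fhProviderTable "DOCKER" = some "Docker" := by decide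
          have key : ∀ (Q : List Char) (t : String), (String.ofList Q = t) ↔ Q = t.toList := by
            intro Q t
            constructor
            · intro h; rw [← h]; simp
            · intro h; rw [h]; simp
          have gnone : ∀ Q : List Char, ¬Q = "AWS".toList → ¬Q = "AZURE".toList → ¬Q = "GCP".toList →
              ¬Q = "K8S".toList → ¬Q = "DOCKER".toList →
              PySem.Dict.get? fhProviderTable (String.ofList Q) = none := by
            intro Q hq1 hq2 hq3 hq4 hq5
            have htab : fhProviderTable = PySem.Dict.mk
                [("AWS", "AWS"), ("AZURE", "Azure"), ("GCP", "GCP"),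
                 ("K8S", "Kubernetes"), ("DOCKER", "Docker")] := by decide
            have kf : ∀ t : String, ¬ Q = t.toList → (t == String.ofList Q) = false := by
              intro t ht
              simp only [beq_eq_false_iff_ne, ne_eq]
              intro h
              exact ht (by rw [h]; simp)
            rw [htab]
            simp [kf _ hq1, kf _ hq2, kf _ hq3, kf _ hq4, kf _ hq5, PySem.Dict.get?]
          have t1 : "CKV".toList = ['C','K','V'] := by decide
          have t2 : "CKV2".toList = ['C','K','V','2'] := by decide
          have t3 : "AWS".toList = ['A','W','S'] := by decide
          have t4 : "AZURE".toList = ['A','Z','U','R','E'] := by decide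
          have t5 : "GCP".toList = ['G','C','P'] := by decide
          have t6 : "K8S".toList = ['K','8','S'] := by decide
          have t7 : "DOCKER".toList = ['D','O','C','K','E','R'] := by decide
          have o3 : String.ofList ['A','W','S'] = "AWS" := by decide
          have o4 : String.ofList ['A','Z','U','R','E'] = "AZURE" := by decide
          have o5 : String.ofList ['G','C','P'] = "GCP" := by decide
          have o6 : String.ofList ['K','8','S'] = "K8S" := by decide
          have o7 : String.ofList ['D','O','C','K','E','R'] = "DOCKER" := by decide
          simp only [key, t1, t2, t3, t4, t5, t6, t7]
          have hne : (['C','K','V'] : List Char) ≠ ['C','K','V','2'] := by decide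
          by_cases hV1 : V = ['C','K','V']
          · have hV2 : ¬ V = ['C','K','V','2'] := by rw [hV1]; exact hne
            simp only [hV1, hV2, if_true, if_false, and_false, false_and, true_and, eq_self_iff_true,
              not_false_iff]
            by_cases hP1 : P = ['A','W','S']
            · subst hP1; simp [o3, g1]
            · by_cases hP2 : P = ['A','Z','U','R','E']
              · subst hP2; simp [hP1, o4, g2]
              · by_cases hP3 : P = ['G','C','P']
                · subst hP3; simp [hP1, hP2, o5, g3]
                · by_cases hP4 : P = ['K','8','S']
                  · subst hP4; simp [hP1, hP2, hP3, o6, g4]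
                  · by_cases hP5 : P = ['D','O','C','K','E','R']
                    · subst hP5; simp [hP1, hP2, hP3, hP4, o7, g5]
                    · have gg := gnone P (by simpa [t3] using hP1) (by simpa [t4] using hP2)
                        (by simpa [t5] using hP3) (by simpa [t6] using hP4) (by simpa [t7] using hP5)
                      simp [hP1, hP2, hP3, hP4, hP5, gg]
          · by_cases hV2 : V = ['C','K','V','2']
            · simp only [hV1, hV2, if_true, if_false, and_false, false_and, true_and, eq_self_iff_true,
                not_false_iff, and_true]
              by_cases hP1 : P = ['A','W','S']
              · subst hP1; simp [o3, g1]
              · by_cases hP2 : P = ['A','Z','U','R','E']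
                · subst hP2; simp [hP1, o4, g2]
                · by_cases hP3 : P = ['G','C','P']
                  · subst hP3; simp [hP1, hP2, o5, g3]
                  · simp [hP1, hP2, hP3]
            · simp [hV1, hV2]
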